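-- pv_equiv track=rewrite | github.com/God-FearingCoder01/leetCodeMe | trial.py | helper
-- ===== SOURCE A (Python) =====
-- def helper(words, max_width):
--     num_characters, last_space, line_words = 0, True, []
--     remaining_words = words.copy()
--     for word in words:
--         word_num_characters = len(word)
--         projected_num_characters = num_characters + word_num_characters
--         num_space_available = max_width - projected_num_characters
--         space_is_available = True if num_space_available > 0 else False
--         just_enough = True if num_space_available == 0 else False
--         if space_is_available: num_characters = projected_num_characters + 1 # the word's space
--         elif just_enough:
--             num_characters = projected_num_characters
--             last_space = False
--         else: break
--         line_words.append(remaining_words.pop(remaining_words.index(word)))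
--     free_spaces = max_width - num_characters
--     return (free_spaces, line_words, remaining_words, last_space)
-- ===== SOURCE B (Python) =====
-- def helper(words, max_width):
--     # Prefix table g[k] = chars of words[:k+1] plus one trailing space per word,
--     # then one scan for the longest fitting prefix; slices instead of append/pop.
--     # Does not mutate words.
--     g = []
--     total = 0
--     for w in words:
--         total += len(w) + 1
--         g.append(total)
--     k, cost = 0, 0
--     while k < len(g) and g[k] <= max_width + 1:
--         cost = g[k]
--         k += 1
--     if k and cost == max_width + 1:
--         # exact fit: the line ends without its trailing space
--         return (0, words[:k], words[k:], False)
--     return (max_width - cost, words[:k], words[k:], True)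
-- ===== Notes on version B (the rewrite author's own statement) =====
-- stated objective: faster
-- what changed: Replaces A's append/index/pop mutation loop (a linear scan of remaining_words per word) by a prefix-cost table built in one pass, a single scan for the longest fitting prefix, and list slices for line/remaining; no mutation of the input.
-- intended difference: When a prefix exactly fills max_width and the very next word is the empty string, A keeps appending those zero-length words to the already-full line (its just_enough branch fires again), while B ends the line at the exact fit and leaves the empty words for the next line, which is the intended greedy packing. — e.g. on helper(["ab", ""], 2): A returns (0, ["ab", ""], [], false), B returns (0, ["ab"], [""], false)
import Mathlib
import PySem

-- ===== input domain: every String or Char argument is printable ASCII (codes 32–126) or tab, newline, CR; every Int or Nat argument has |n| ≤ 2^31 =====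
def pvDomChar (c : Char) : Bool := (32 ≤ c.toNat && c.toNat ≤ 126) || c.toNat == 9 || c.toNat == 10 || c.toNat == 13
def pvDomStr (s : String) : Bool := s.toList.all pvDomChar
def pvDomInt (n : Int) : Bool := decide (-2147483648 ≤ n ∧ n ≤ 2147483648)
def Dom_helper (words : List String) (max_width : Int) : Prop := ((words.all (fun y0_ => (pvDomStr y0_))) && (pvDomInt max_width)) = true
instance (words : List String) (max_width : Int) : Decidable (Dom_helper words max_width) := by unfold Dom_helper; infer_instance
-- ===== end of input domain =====

-- B replaces A's append/index/pop mutation loop by a prefix-cost table + one scan + slices (equivalence is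
-- about the RETURN value — A mutates no caller-visible state: it pops a copy; B differs from A only on the
-- exact-fit-then-empty-word corner stated at D_helper below).

-- ===== PORT A =====
-- the for-loop of A: state (num_characters, last_space, line_words, remaining_words); first arg = words still to iterate
def aLoop (ws : List String) (mw c : Int) (ls : Bool) (line rem : List String) :
    Int × List String × List String × Bool :=
  match ws with
  | [] => (mw - c, line, rem, ls)
  | w :: ws' =>
    let proj := c + PySem.Str.len w
    let avail := mw - proj
    if avail > 0 then
      match PySem.List.index? rem w with
      | some i =>
        match PySem.List.pop? rem (i : Int) with
        | some (x, rem') => aLoop ws' mw (proj + 1) ls (line ++ [x]) rem'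
        | none => (0, [], [], true)   -- unreachable: i is a valid index of rem (Python never raises here)
      | none => (0, [], [], true)     -- unreachable: word is always in remaining_words
    else if avail = 0 then
      match PySem.List.index? rem w with
      | some i =>
        match PySem.List.pop? rem (i : Int) with
        | some (x, rem') => aLoop ws' mw proj false (line ++ [x]) rem'
        | none => (0, [], [], true)   -- unreachable
      | none => (0, [], [], true)     -- unreachable
    else (mw - c, line, rem, ls)      -- break

def helper (words : List String) (max_width : Int) : Int × List String × List String × Bool :=
  aLoop words max_width 0 true [] words

-- ===== PORT B =====
-- for w in words: total += len(w)+1; g.append(total)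
def gAcc (ws : List String) (total : Int) : List Int :=
  match ws with
  | [] => []
  | w :: ws' => (total + PySem.Str.len w + 1) :: gAcc ws' (total + PySem.Str.len w + 1)

-- while k < len(g) and g[k] <= max_width + 1: cost = g[k]; k += 1   — returns (k, cost)
def bScan (g : List Int) (mw cost : Int) : Nat × Int :=
  match g with
  | [] => (0, cost)
  | x :: g' =>
    if x ≤ mw + 1 then
      let r := bScan g' mw x
      (r.1 + 1, r.2)
    else (0, cost)

def helper_alt (words : List String) (max_width : Int) : Int × List String × List String × Bool :=
  let g := gAcc words 0
  let r := bScan g max_width 0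
  let k := r.1
  let cost := r.2
  if 0 < k ∧ cost = max_width + 1 then
    (0, words.take k, words.drop k, false)          -- words[:k] / words[k:]
  else (max_width - cost, words.take k, words.drop k, true)

-- ===== PRECONDITION & SPEC =====
-- When some prefix of the words exactly fills max_width and the very next word is the empty string, A keeps
-- appending those zero-length words to the already-full line (just_enough fires again for them), while B ends
-- the line at the exact fit and leaves the empty words for the next line — the intended greedy packing.
def D_helper (words : List String) (max_width : Int) : Prop :=
  ∃ k, k < words.length ∧ 0 < k ∧
    ((words.take k).map PySem.Str.len).sum + (k : Int) = max_width + 1 ∧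
    words[k]? = some ""
instance (words : List String) (max_width : Int) : Decidable (D_helper words max_width) := by unfold D_helper; infer_instance

def Spec_helper (words : List String) (max_width : Int) (out : Int × List String × List String × Bool) : Prop := ¬ D_helper words max_width → out = helper_alt words max_width
instance (words : List String) (max_width : Int) (out : Int × List String × List String × Bool) : Decidable (Spec_helper words max_width out) := by unfold Spec_helper; infer_instance

def pvDiffWitness_helper : List String × Int := (["ab", ""], 2)
def pvDiffWitnessOut_helper : (Int × List String × List String × Bool) × (Int × List String × List String × Bool) :=
  ((0, ["ab", ""], [], false), (0, ["ab"], [""], false))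

-- ===== CLAIM (what is proved, stated in full; the proofs are below) =====
def Claim_unchanged_helper : Prop := ∀ (words : List String) (max_width : Int), Dom_helper words max_width → Spec_helper words max_width (helper words max_width)
def Claim_changed_helper : Prop := Dom_helper (pvDiffWitness_helper.1) (pvDiffWitness_helper.2) ∧ D_helper (pvDiffWitness_helper.1) (pvDiffWitness_helper.2) ∧ helper (pvDiffWitness_helper.1) (pvDiffWitness_helper.2) = pvDiffWitnessOut_helper.1 ∧ helper_alt (pvDiffWitness_helper.1) (pvDiffWitness_helper.2) = pvDiffWitnessOut_helper.2 ∧ pvDiffWitnessOut_helper.1 ≠ pvDiffWitnessOut_helper.2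
def Claim_exact_helper : Prop := ∀ (words : List String) (max_width : Int), Dom_helper words max_width → D_helper words max_width → helper words max_width ≠ helper_alt words max_width

-- ===== LEMMAS AND PROOFS =====

theorem strLen_nonneg (w : String) : 0 ≤ PySem.Str.len w := by
  simp [PySem.Str.len_eq]

theorem sumLen_nonneg (ws : List String) : 0 ≤ (ws.map PySem.Str.len).sum := by
  induction ws with
  | nil => simp
  | cons w ws ih => have := strLen_nonneg w; simp [List.sum_cons]; omega

theorem pop0 (w : String) (ws : List String) :
    PySem.List.pop? (w :: ws) ((0 : Nat) : Int) = some (w, ws) := by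
  simp [PySem.List.pop?_zero_cons]

theorem lenZero (w : String) (h : PySem.Str.len w = 0) : w = "" := by
  simp [PySem.Str.len_eq] at h
  exact ((String.empty_eq_iff).mpr h).symm

theorem lenZero' (w : String) (h : ¬ PySem.Str.len w = 0) : ¬ w = "" := by
  intro h'; subst h'; exact h (by decide)

-- the leading empty words of a list (what A keeps consuming after an exact fit)
def skipEmpty (ws : List String) : Nat :=
  match ws with
  | [] => 0
  | w :: ws' => if PySem.Str.len w = 0 then skipEmpty ws' + 1 else 0

-- one step of A's loop when remaining_words is exactly the suffix being iterated
theorem aLoop_cons (w : String) (ws : List String) (mw c : Int) (ls : Bool) (line : List String) :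
    aLoop (w :: ws) mw c ls line (w :: ws) =
      (if mw - (c + PySem.Str.len w) > 0 then
        aLoop ws mw (c + PySem.Str.len w + 1) ls (line ++ [w]) ws
      else if mw - (c + PySem.Str.len w) = 0 then
        aLoop ws mw (c + PySem.Str.len w) false (line ++ [w]) ws
      else (mw - c, line, w :: ws, ls)) := by
  simp only [aLoop, PySem.List.index?_cons_self, pop0]

-- once num_characters = mw with last_space = False, A consumes exactly the leading empty words
theorem aLoop_exact (ws : List String) (mw : Int) (line : List String) :
    aLoop ws mw mw false line ws =
      (0, line ++ ws.take (skipEmpty ws), ws.drop (skipEmpty ws), false) := by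
  induction ws generalizing line with
  | nil => simp [aLoop, skipEmpty]
  | cons w ws ih =>
    have hw := strLen_nonneg w
    rw [aLoop_cons]
    by_cases h0 : PySem.Str.len w = 0
    · rw [if_neg (by omega), if_pos (by omega), h0, add_zero, ih]
      simp [skipEmpty, lenZero w h0]
    · rw [if_neg (by omega), if_neg (by omega)]
      simp [skipEmpty, lenZero' w h0]

theorem bScan_k_zero (g : List Int) (mw c : Int) (h : (bScan g mw c).1 = 0) :
    (bScan g mw c).2 = c := by
  cases g with
  | nil => rfl
  | cons x g' =>
    simp only [bScan] at h ⊢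
    split at h
    · simp at h
    · split
      · omega
      · rfl

theorem bScan_of_ge (g : List String) (mw t : Int) (h : mw + 1 ≤ t) :
    bScan (gAcc g t) mw t = (0, t) := by
  cases g with
  | nil => rfl
  | cons w ws =>
    have := strLen_nonneg w
    simp only [gAcc, bScan]
    rw [if_neg (by omega)]

-- main invariant: A's loop, in normal mode, computes B's scan result plus the trailing empty words
theorem aLoop_main (ws : List String) (mw : Int) :
    ∀ (c : Int) (line : List String),
    aLoop ws mw c true line ws =
      (let r := bScan (gAcc ws c) mw c
       if 0 < r.1 ∧ r.2 = mw + 1 then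
         (0, line ++ ws.take (r.1 + skipEmpty (ws.drop r.1)),
          ws.drop (r.1 + skipEmpty (ws.drop r.1)), false)
       else (mw - r.2, line ++ ws.take r.1, ws.drop r.1, true)) := by
  induction ws with
  | nil => intro c line; simp [aLoop, gAcc, bScan]
  | cons w ws ih =>
    intro c line
    have hw := strLen_nonneg w
    rw [aLoop_cons]
    by_cases hpos : mw - (c + PySem.Str.len w) > 0
    · -- word fits with room to spare
      rw [if_pos hpos, ih (c + PySem.Str.len w + 1) (line ++ [w])]
      simp only [gAcc, bScan, if_pos (show c + PySem.Str.len w + 1 ≤ mw + 1 by omega)]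
      set r := bScan (gAcc ws (c + PySem.Str.len w + 1)) mw (c + PySem.Str.len w + 1) with hr
      by_cases hk : r.1 = 0
      · -- inner count 0: its cost is the initial one, which is < mw+1, so both conditions are false
        have hc2 : r.2 = c + PySem.Str.len w + 1 := bScan_k_zero _ _ _ hk
        rw [if_neg (by omega)]
        rw [if_neg (by intro hcon; omega)]
        simp [hk, hc2]
      · by_cases hcond : 0 < r.1 ∧ r.2 = mw + 1
        · rw [if_pos hcond]
          rw [if_pos (show 0 < (bScan (gAcc ws (c + PySem.Str.len w + 1)) mw (c + PySem.Str.len w + 1)).1 + 1 ∧ _ from ⟨by omega, hcond.2⟩)]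
          have hsh : r.1 + 1 + skipEmpty (List.drop (r.1 + 1) (w :: ws)) =
              (r.1 + skipEmpty (List.drop r.1 ws)) + 1 := by
            simp [List.drop_succ_cons]
            omega
          rw [hsh]
          simp [List.take_succ_cons, List.drop_succ_cons, List.append_assoc]
        · rw [if_neg hcond]
          rw [if_neg (by rintro ⟨h1, h2⟩; exact hcond ⟨by omega, h2⟩)]
          simp [List.take_succ_cons, List.drop_succ_cons, List.append_assoc]
    · by_cases hz : mw - (c + PySem.Str.len w) = 0
      · -- exact fit: last_space := False, then only leading empty words are consumed
        rw [if_neg hpos, if_pos hz]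
        have hc : c + PySem.Str.len w = mw := by omega
        rw [hc, aLoop_exact]
        simp only [gAcc, bScan, if_pos (show c + PySem.Str.len w + 1 ≤ mw + 1 by omega)]
        rw [hc, bScan_of_ge ws mw (mw + 1) (le_refl _)]
        simp [Nat.one_add, List.drop_succ_cons, List.append_assoc]
      · -- word does not fit: break
        rw [if_neg hpos, if_neg hz]
        simp only [gAcc, bScan]
        rw [if_neg (show ¬ (c + PySem.Str.len w + 1 ≤ mw + 1) by omega)]
        simp

-- B's scan result: its cost is the prefix cost of the k it returns, and k is within range
theorem bScan_sum (ws : List String) (mw : Int) :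
    ∀ t, (bScan (gAcc ws t) mw t).2 =
        t + ((ws.take (bScan (gAcc ws t) mw t).1).map PySem.Str.len).sum
          + ((bScan (gAcc ws t) mw t).1 : Int)
      ∧ (bScan (gAcc ws t) mw t).1 ≤ ws.length := by
  induction ws with
  | nil => intro t; simp [gAcc, bScan]
  | cons w ws ih =>
    intro t
    simp only [gAcc, bScan]
    by_cases h : t + PySem.Str.len w + 1 ≤ mw + 1
    · rw [if_pos h]
      obtain ⟨h1, h2⟩ := ih (t + PySem.Str.len w + 1)
      constructor
      · simp only [List.take_succ_cons, List.map_cons, List.sum_cons]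
        rw [h1]; push_cast; ring
      · simpa using h2
    · rw [if_neg h]; simp

-- if prefix k0 has cost exactly mw+1, B's scan stops exactly at k0 with that cost
theorem bScan_hits (ws : List String) (mw : Int) :
    ∀ (t : Int) (k0 : Nat), 0 < k0 → k0 ≤ ws.length →
      t + ((ws.take k0).map PySem.Str.len).sum + (k0 : Int) = mw + 1 →
      bScan (gAcc ws t) mw t = (k0, mw + 1) := by
  induction ws with
  | nil => intro t k0 h1 h2; simp at h2; omega
  | cons w ws ih =>
    intro t k0 h1 h2 h3
    simp only [gAcc, bScan]
    match k0, h1 with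
    | 1, _ =>
      simp only [List.take_succ_cons, List.take_zero, List.map_cons, List.map_nil,
        List.sum_cons, List.sum_nil] at h3
      have hx : t + PySem.Str.len w + 1 = mw + 1 := by push_cast at h3; omega
      rw [if_pos (le_of_eq hx), hx, bScan_of_ge ws mw (mw + 1) (le_refl _)]
    | k + 2, _ =>
      have hle : k + 1 ≤ ws.length := by simpa using h2
      simp only [List.take_succ_cons, List.map_cons, List.sum_cons] at h3
      have hs := sumLen_nonneg (ws.take (k + 1))
      have h3' : (t + PySem.Str.len w + 1) + ((ws.take (k + 1)).map PySem.Str.len).sum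
          + ((k + 1 : Nat) : Int) = mw + 1 := by push_cast at h3 ⊢; omega
      have hfit : t + PySem.Str.len w + 1 ≤ mw + 1 := by
        push_cast at h3'
        omega
      rw [if_pos hfit, ih (t + PySem.Str.len w + 1) (k + 1) (by omega) hle h3']

theorem skipEmpty_pos_head (ws : List String) (h : skipEmpty ws ≠ 0) :
    ws[0]? = some "" := by
  cases ws with
  | nil => simp [skipEmpty] at h
  | cons w ws' =>
    simp only [skipEmpty] at h
    by_cases h0 : PySem.Str.len w = 0
    · simp [lenZero w h0]
    · rw [if_neg h0] at h; omega

-- ===== VERDICT (by name: the statements are the Claim_ definitions above) =====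
theorem helper_spec : Claim_unchanged_helper := by
  intro words mw _
  unfold Spec_helper
  intro hnD
  unfold helper helper_alt
  rw [aLoop_main words mw 0 []]
  simp only [List.nil_append]
  set r := bScan (gAcc words 0) mw 0 with hr
  by_cases hcond : 0 < r.1 ∧ r.2 = mw + 1
  · rw [if_pos hcond, if_pos hcond]
    by_cases he : skipEmpty (words.drop r.1) = 0
    · rw [he]; simp
    · exfalso
      apply hnD
      obtain ⟨hsum, hlen⟩ := bScan_sum words mw 0
      rw [← hr] at hsum hlen
      have hget := skipEmpty_pos_head _ he
      rw [List.getElem?_drop] at hget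
      have hklt : r.1 < words.length := by
        by_contra hge
        rw [List.getElem?_eq_none_iff.mpr (by omega)] at hget
        simp at hget
      exact ⟨r.1, hklt, hcond.1, by omega, by simpa using hget⟩
  · rw [if_neg hcond, if_neg hcond]

theorem helper_changed : Claim_changed_helper := by unfold Claim_changed_helper; decide

theorem helper_tight : Claim_exact_helper := by
  intro words mw _ hD
  obtain ⟨k0, hklt, hkpos, hsum, hget⟩ := hD
  have hscan : bScan (gAcc words 0) mw 0 = (k0, mw + 1) :=
    bScan_hits words mw 0 k0 hkpos (le_of_lt hklt) (by rw [← hsum]; ring)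
  have hskip : 1 ≤ skipEmpty (words.drop k0) := by
    have : words.drop k0 = "" :: words.drop (k0 + 1) := by
      have h0 : (words.drop k0)[0]? = some "" := by
        rw [List.getElem?_drop]; simpa using hget
      cases hd : words.drop k0 with
      | nil => rw [hd] at h0; simp at h0
      | cons x xs =>
        rw [hd] at h0
        simp at h0
        rw [← h0]
        congr 1
        have := congrArg List.tail hd
        simpa [List.tail_drop] using this.symm
    rw [this]
    simp [skipEmpty, PySem.Str.len]
  unfold helper helper_alt
  rw [aLoop_main words mw 0 []]
  simp only [List.nil_append, hscan]
  rw [if_pos (show 0 < k0 ∧ True from ⟨hkpos, trivial⟩), if_pos (show 0 < k0 ∧ True from ⟨hkpos, trivial⟩)]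
  intro heq
  have hlen := congrArg (fun p => p.2.1.length) heq
  simp only [List.length_take] at hlen
  omega
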